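-- pv_equiv track=rewrite | github.com/zmEuropa/apk-info | CVTE-APK-Info.py | ToDealWithVersionNameString
-- ===== SOURCE A (Python) =====
-- def ToDealWithVersionNameString(string):
--     str = ''
--     for word in string:
--         if word >= '0' and word <= '9':
--             str += word
--         elif word is '.':
--             str += word
--         else :
--             break
--     return  str;
-- ===== SOURCE B (Python) =====
-- import re
--
-- _PREFIX = re.compile(r'[0-9.]*')
--
-- def ToDealWithVersionNameString(string):
--     return _PREFIX.match(string).group()
-- ===== Notes on version B (the rewrite author's own statement) =====
-- stated objective: idiomatic
-- what changed: Replaces the manual accumulate-and-break character loop with a single regex match of the character class [0-9.]* returning the matched prefix directly.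
import Mathlib
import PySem

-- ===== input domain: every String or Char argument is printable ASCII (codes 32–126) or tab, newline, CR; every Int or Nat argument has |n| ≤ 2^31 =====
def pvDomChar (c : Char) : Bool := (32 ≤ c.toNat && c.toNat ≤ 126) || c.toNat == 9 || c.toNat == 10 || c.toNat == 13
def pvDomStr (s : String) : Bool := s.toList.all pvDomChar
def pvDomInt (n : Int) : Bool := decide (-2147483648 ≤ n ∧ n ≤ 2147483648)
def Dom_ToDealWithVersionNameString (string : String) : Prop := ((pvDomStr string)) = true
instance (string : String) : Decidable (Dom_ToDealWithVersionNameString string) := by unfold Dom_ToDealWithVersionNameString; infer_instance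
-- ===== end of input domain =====

-- B replaces the manual accumulate-and-break loop with a regex prefix match (ported as takeWhile of the class [0-9.]): idiomatic, same cost.


-- ===== PORT A =====
-- go: the 'for word in string' loop with break, carrying the accumulator 'str'
def pvGoA (acc : List Char) : List Char → List Char
  | [] => acc
  | w :: rest =>
    if '0' ≤ w ∧ w ≤ '9' then pvGoA (acc ++ [w]) rest
    else if w = '.' then pvGoA (acc ++ [w]) rest
    else acc

def ToDealWithVersionNameString (string : String) : String :=
  String.mk (pvGoA [] string.toList)

-- ===== PORT B =====
-- Source B: re.match(r'[0-9.]*', string).group() — the longest prefix of characters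
-- in the class [0-9.]; ported exactly as takeWhile of that character class.
def pvClassB (c : Char) : Bool := ('0' ≤ c && c ≤ '9') || c == '.'

def ToDealWithVersionNameString_alt (string : String) : String :=
  String.mk (string.toList.takeWhile pvClassB)

-- ===== PRECONDITION & SPEC =====
def Spec_ToDealWithVersionNameString (string : String) (out : String) : Prop := out = ToDealWithVersionNameString_alt string
instance (string : String) (out : String) : Decidable (Spec_ToDealWithVersionNameString string out) := by unfold Spec_ToDealWithVersionNameString; infer_instance

-- ===== CLAIM (what is proved, stated in full; the proofs are below) =====
def Claim_equal_ToDealWithVersionNameString : Prop := ∀ (string : String), Dom_ToDealWithVersionNameString string → Spec_ToDealWithVersionNameString string (ToDealWithVersionNameString string)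

-- ===== LEMMAS AND PROOFS =====
theorem pvGoA_takeWhile (l acc : List Char) :
    pvGoA acc l = acc ++ l.takeWhile pvClassB := by
  induction l generalizing acc with
  | nil => simp [pvGoA]
  | cons w rest ih =>
    by_cases h : '0' ≤ w ∧ w ≤ '9'
    · simp [pvGoA, h, List.takeWhile, pvClassB, h.1, ih]
    · by_cases hd : w = '.'
      · simp [pvGoA, hd, List.takeWhile, pvClassB, ih]
      · have : pvClassB w = false := by
          simp [pvClassB]
          constructor
          · intro h0; by_contra h9; exact h ⟨h0, le_of_not_gt (by simpa using h9)⟩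
          · exact hd
        simp [pvGoA, h, hd, List.takeWhile, this]

-- ===== VERDICT (by name: the statement is the Claim_ definition above) =====
theorem ToDealWithVersionNameString_spec : Claim_equal_ToDealWithVersionNameString := by
  intro s _
  show _ = _
  simp [ToDealWithVersionNameString, ToDealWithVersionNameString_alt, pvGoA_takeWhile]
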